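-- pv_equiv track=rewrite | github.com/jxmils/tpu-inference | tpu_inference/runner/request_trace.py | bucket_length
-- ===== SOURCE A (Python) =====
-- def bucket_length(value: int) -> str:
--     if value <= 0:
--         return "0"
--     bounds = [16, 32, 64, 128, 256, 512, 1024, 2048, 4096, 8192]
--     prev = 0
--     for bound in bounds:
--         if value <= bound:
--             return f"{prev}-{bound}"
--         prev = bound + 1
--     return f"{bounds[-1] + 1}+"
-- ===== SOURCE B (Python) =====
-- def bucket_length(value: int) -> str:
--     if value <= 0:
--         return "0"
--     if value > 8192:
--         return "8193+"
--     bound = max(16, 1 << (value - 1).bit_length())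
--     prev = 0 if bound == 16 else bound // 2 + 1
--     return f"{prev}-{bound}"
-- ===== Notes on version B (the rewrite author's own statement) =====
-- stated objective: simpler
-- what changed: Replaced the linear scan over the bucket-bound list by a closed-form computation: the upper bound is the clamped next power of two obtained from bit_length of value minus one, and the lower bound follows arithmetically.
import Mathlib
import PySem

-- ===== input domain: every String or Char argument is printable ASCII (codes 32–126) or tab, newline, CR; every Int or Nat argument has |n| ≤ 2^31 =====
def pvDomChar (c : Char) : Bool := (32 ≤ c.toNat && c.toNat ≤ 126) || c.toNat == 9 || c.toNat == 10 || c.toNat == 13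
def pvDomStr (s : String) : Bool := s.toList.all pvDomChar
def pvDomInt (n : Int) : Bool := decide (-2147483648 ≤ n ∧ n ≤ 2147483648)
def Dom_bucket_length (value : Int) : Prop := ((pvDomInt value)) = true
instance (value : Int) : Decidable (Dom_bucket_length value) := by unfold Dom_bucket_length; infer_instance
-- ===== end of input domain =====

-- B replaces A's linear scan of the bucket list by a closed-form bit_length computation (objective: simpler).

-- ===== PORT A =====
-- the for-loop with early return, as structural recursion over the bounds list
def bucketLoopA (value : Int) : List Int → Int → Option String
  | [], _ => none
  | b :: rest, prev =>
      if value ≤ b then some (PySem.Int.toStr prev ++ "-" ++ PySem.Int.toStr b)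
      else bucketLoopA value rest (b + 1)

def bucket_length (value : Int) : String :=
  if value ≤ 0 then "0"
  else
    let bounds : List Int := [16, 32, 64, 128, 256, 512, 1024, 2048, 4096, 8192]
    match bucketLoopA value bounds 0 with
    | some s => s
    | none => PySem.Int.toStr ((PySem.List.pyGet? bounds (-1)).getD 0 + 1) ++ "+"

-- ===== PORT B =====
-- (value-1).bit_length() ported as PySem.Int.bitLength (Python-exact)
def bucket_length_alt (value : Int) : String :=
  if value ≤ 0 then "0"
  else if value > 8192 then "8193+"
  else
    let bound : Int := max 16 ((1 <<< PySem.Int.bitLength (value - 1) : ℕ) : Int)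
    let prev : Int := if bound = 16 then 0 else PySem.Int.floordiv bound 2 + 1
    PySem.Int.toStr prev ++ "-" ++ PySem.Int.toStr bound

-- ===== PRECONDITION & SPEC =====
def Spec_bucket_length (value : Int) (out : String) : Prop := out = bucket_length_alt value
instance (value : Int) (out : String) : Decidable (Spec_bucket_length value out) := by unfold Spec_bucket_length; infer_instance

-- ===== CLAIM (what is proved, stated in full; the proofs are below) =====
def Claim_equal_bucket_length : Prop := ∀ (value : Int), Dom_bucket_length value → Spec_bucket_length value (bucket_length value)

-- ===== LEMMAS AND PROOFS =====

theorem bitLength_le_of_lt (n : Int) (k : ℕ) (h : n.natAbs < 2 ^ k) :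
    PySem.Int.bitLength n ≤ k := by
  by_cases hz : n = 0
  · simp [hz]
  · have hle := PySem.Int.two_pow_bitLength_le n hz
    have h2 : 2 ^ (PySem.Int.bitLength n - 1) < 2 ^ k := lt_of_le_of_lt hle h
    have h3 : PySem.Int.bitLength n - 1 < k := (Nat.pow_lt_pow_iff_right (by norm_num)).mp h2
    have h4 : PySem.Int.bitLength n ≠ 0 := by
      intro h0
      have := PySem.Int.lt_two_pow_bitLength n
      rw [h0] at this
      simp at this
      omega
    omega

theorem bitLength_eq_of_bounds (n : Int) (k : ℕ)
    (h1 : (2 ^ k : Int) ≤ n) (h2 : n < (2 ^ (k + 1) : Int)) :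
    PySem.Int.bitLength n = k + 1 := by
  have hpos : 0 < n := lt_of_lt_of_le (by positivity) h1
  have hcast : ((2 ^ k : ℕ) : Int) = (2 ^ k : Int) := by push_cast; ring
  have hcast' : ((2 ^ (k+1) : ℕ) : Int) = (2 ^ (k+1) : Int) := by push_cast; ring
  have hlo : 2 ^ k ≤ n.natAbs := by omega
  have hhi : n.natAbs < 2 ^ (k + 1) := by omega
  have ha : PySem.Int.bitLength n ≤ k + 1 := bitLength_le_of_lt n (k+1) hhi
  have hb : k < PySem.Int.bitLength n := by
    have hlt := PySem.Int.lt_two_pow_bitLength n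
    have : 2 ^ k < 2 ^ PySem.Int.bitLength n := lt_of_le_of_lt hlo hlt
    exact (Nat.pow_lt_pow_iff_right (by norm_num)).mp this
  omega

theorem alt_eval_bucket (value : Int) (k : ℕ) (hk : 4 ≤ k) (hk' : k ≤ 12)
    (h1 : (2 ^ k : Int) < value) (h2 : value ≤ (2 ^ (k + 1) : Int)) :
    bucket_length_alt value =
      PySem.Int.toStr ((2 ^ k : Int) + 1) ++ "-" ++ PySem.Int.toStr (2 ^ (k + 1)) := by
  have hs : PySem.Int.bitLength (value - 1) = k + 1 :=
    bitLength_eq_of_bounds (value - 1) k (by omega) (by omega)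
  have h0 : ¬ value ≤ 0 := by
    have : (0:Int) < 2 ^ k := by positivity
    omega
  have h8 : ¬ value > 8192 := by
    have : (2:Int) ^ (k+1) ≤ 2 ^ 13 := pow_le_pow_right₀ (by norm_num) (by omega)
    have h13 : (2:Int) ^ 13 = 8192 := by norm_num
    omega
  simp only [bucket_length_alt, if_neg h0, if_neg h8, hs]
  have hshift : ((1 <<< (k + 1) : ℕ) : Int) = (2 ^ (k + 1) : Int) := by
    simp [Nat.shiftLeft_eq]
  rw [hshift]
  have h16le : (16:Int) ≤ 2 ^ (k+1) := by
    calc (16:Int) = 2 ^ 4 := by norm_num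
      _ ≤ 2 ^ (k+1) := pow_le_pow_right₀ (by norm_num) (by omega)
  rw [max_eq_right h16le]
  have hne : (2 ^ (k+1) : Int) ≠ 16 := by
    have : (32:Int) ≤ 2 ^ (k+1) := by
      calc (32:Int) = 2 ^ 5 := by norm_num
        _ ≤ 2 ^ (k+1) := pow_le_pow_right₀ (by norm_num) (by omega)
    omega
  rw [if_neg hne]
  have hdiv : PySem.Int.floordiv (2 ^ (k+1) : Int) 2 = 2 ^ k := by
    rw [PySem.Int.floordiv_eq_ediv_of_pos (by norm_num), pow_succ]
    exact Int.mul_ediv_cancel _ two_ne_zero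
  rw [hdiv]

theorem alt_eval_first (value : Int) (h0 : ¬ value ≤ 0) (h16 : value ≤ 16) :
    bucket_length_alt value = PySem.Int.toStr 0 ++ "-" ++ PySem.Int.toStr 16 := by
  have h8 : ¬ value > 8192 := by omega
  have hs : PySem.Int.bitLength (value - 1) ≤ 4 :=
    bitLength_le_of_lt (value - 1) 4 (by omega)
  have hle : ((1 <<< PySem.Int.bitLength (value - 1) : ℕ) : Int) ≤ 16 := by
    have h1 : (1 <<< PySem.Int.bitLength (value - 1) : ℕ) ≤ 2 ^ 4 := by
      rw [Nat.one_shiftLeft]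
      exact Nat.pow_le_pow_right (by norm_num) hs
    have : ((1 <<< PySem.Int.bitLength (value - 1) : ℕ) : Int) ≤ ((2 ^ 4 : ℕ) : Int) := by
      exact_mod_cast h1
    omega
  simp only [bucket_length_alt, if_neg h0, if_neg h8, max_eq_left hle]
  norm_num

set_option maxHeartbeats 1600000 in
theorem A_eval_bucket (value : Int) (k : ℕ) (hk : 4 ≤ k) (hk' : k ≤ 12)
    (h1 : (2 ^ k : Int) < value) (h2 : value ≤ (2 ^ (k + 1) : Int)) :
    bucket_length value =
      PySem.Int.toStr ((2 ^ k : Int) + 1) ++ "-" ++ PySem.Int.toStr (2 ^ (k + 1)) := by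
  have h0 : ¬ value ≤ 0 := by
    have : (0:Int) < 2 ^ k := by positivity
    omega
  interval_cases k <;>
    · norm_num at h1 h2
      simp only [bucket_length, bucketLoopA, if_neg h0]
      split_ifs <;> first | rfl | omega

-- ===== VERDICT (by name: the statement is the Claim_ definition above) =====
theorem bucket_length_spec : Claim_equal_bucket_length := by
  unfold Claim_equal_bucket_length
  intro value _
  unfold Spec_bucket_length
  by_cases h0 : value ≤ 0
  · simp [bucket_length, bucket_length_alt, h0]
  · by_cases h16 : value ≤ 16
    · rw [alt_eval_first value h0 h16]
      simp only [bucket_length, bucketLoopA, if_neg h0, if_pos h16]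
    · by_cases h8192 : value ≤ 8192
      · have : ∃ k : ℕ, 4 ≤ k ∧ k ≤ 12 ∧ (2 ^ k : Int) < value ∧ value ≤ (2 ^ (k + 1) : Int) := by
          rcases (by omega : value ≤ 32 ∨ value ≤ 64 ∧ 32 < value ∨ value ≤ 128 ∧ 64 < value ∨
            value ≤ 256 ∧ 128 < value ∨ value ≤ 512 ∧ 256 < value ∨ value ≤ 1024 ∧ 512 < value ∨
            value ≤ 2048 ∧ 1024 < value ∨ value ≤ 4096 ∧ 2048 < value ∨ 4096 < value) with
            h | h | h | h | h | h | h | h | h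
          · exact ⟨4, by norm_num; omega⟩
          · exact ⟨5, by norm_num; omega⟩
          · exact ⟨6, by norm_num; omega⟩
          · exact ⟨7, by norm_num; omega⟩
          · exact ⟨8, by norm_num; omega⟩
          · exact ⟨9, by norm_num; omega⟩
          · exact ⟨10, by norm_num; omega⟩
          · exact ⟨11, by norm_num; omega⟩
          · exact ⟨12, by norm_num; omega⟩
        obtain ⟨k, hk, hk', hlo, hhi⟩ := this
        rw [A_eval_bucket value k hk hk' hlo hhi, alt_eval_bucket value k hk hk' hlo hhi]
      · simp only [bucket_length, bucket_length_alt, bucketLoopA, if_neg h0]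
        rw [if_pos (by omega : value > 8192)]
        split_ifs <;> first | rfl | omega
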